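-- pv_equiv track=rewrite | github.com/bcgsc/pavfinder | pavfinder/genome/gapped_align.py | find_repeat
-- ===== SOURCE A (Python) =====
-- def find_repeat(seq):
--     def chop_seq(seq, size):
--         """chop seq into equal size sub-strings"""
--         return map(''.join, zip(*[iter(seq)] * size))
--
--     size_range = [2, 4]
--     for size in range(size_range[0], size_range[1] + 1):
--         if len(seq) % size == 0:
--             uniq_subseqs = set(chop_seq(seq, size))
--             if len(uniq_subseqs) == 1:
--                 return list(uniq_subseqs)[0]
--
--     return None
-- ===== SOURCE B (Python) =====
-- def find_repeat(seq):
--     n = len(seq)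
--     for size in range(2, 5):
--         if seq and n % size == 0:
--             unit = seq[:size]
--             if seq == unit * (n // size):
--                 return unit
--     return None
-- ===== Notes on version B (the rewrite author's own statement) =====
-- stated objective: simpler
-- what changed: Replaced the chop-into-chunks-and-deduplicate-into-a-set logic with a closed-form periodicity test: seq equals seq[:size] repeated len(seq)//size times (with an explicit non-empty guard matching A's empty-set behaviour).
import Mathlib
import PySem

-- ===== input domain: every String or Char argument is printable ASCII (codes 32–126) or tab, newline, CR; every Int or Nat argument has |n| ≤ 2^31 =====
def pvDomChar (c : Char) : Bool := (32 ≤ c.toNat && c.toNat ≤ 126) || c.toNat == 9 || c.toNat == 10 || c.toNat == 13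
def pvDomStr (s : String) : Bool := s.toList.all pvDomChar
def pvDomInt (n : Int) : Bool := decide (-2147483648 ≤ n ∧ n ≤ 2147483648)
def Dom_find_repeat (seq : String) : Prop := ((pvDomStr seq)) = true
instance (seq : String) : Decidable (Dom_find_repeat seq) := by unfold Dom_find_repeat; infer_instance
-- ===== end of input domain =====

-- B replaces A's chop-into-chunks + set-deduplication with a closed-form periodicity test
-- (seq == seq[:size] * (len(seq)//size), guarded by seq being non-empty); objective: simpler.

-- ===== PORT A =====
-- chop_seq(seq, size) = map(''.join, zip(*[iter(seq)]*size)): successive size-char chunks,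
-- dropping any shorter remainder.
def chopSeq (l : List Char) (size : Nat) : List (List Char) :=
  if h : 0 < size ∧ size ≤ l.length then
    (l.take size) :: chopSeq (l.drop size) size
  else []
termination_by l.length
decreasing_by
  simp only [List.length_drop]
  omega

-- the for-loop over size in range(2, 4+1) = [2, 3, 4]
def findRepeatLoop (l : List Char) : List Nat → Option String
  | [] => none
  | size :: rest =>
    if l.length % size = 0 then
      let uniq := PySem.Set.ofList (chopSeq l size)
      if uniq.length = 1 then
        some (String.mk (uniq.headD []))   -- list(uniq_subseqs)[0]: the singleton's element
      else findRepeatLoop l rest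
    else findRepeatLoop l rest

def find_repeat (seq : String) : Option String :=
  findRepeatLoop seq.toList [2, 3, 4]

-- ===== PORT B =====
-- for size in range(2, 5): if seq and n % size == 0 and seq == seq[:size] * (n // size): return seq[:size]
def findRepeatAltLoop (l : List Char) : List Nat → Option String
  | [] => none
  | size :: rest =>
    if l ≠ [] ∧ l.length % size = 0 ∧
        l = (List.replicate (l.length / size) (l.take size)).flatten then
      some (String.mk (l.take size))
    else findRepeatAltLoop l rest

def find_repeat_alt (seq : String) : Option String :=
  findRepeatAltLoop seq.toList [2, 3, 4]

-- ===== PRECONDITION & SPEC =====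
def Spec_find_repeat (seq : String) (out : Option String) : Prop := out = find_repeat_alt seq
instance (seq : String) (out : Option String) : Decidable (Spec_find_repeat seq out) := by unfold Spec_find_repeat; infer_instance

-- ===== CLAIM (what is proved, stated in full; the proofs are below) =====
def Claim_equal_find_repeat : Prop := ∀ (seq : String), Dom_find_repeat seq → Spec_find_repeat seq (find_repeat seq)

-- ===== LEMMAS AND PROOFS =====

-- a nonempty list with length divisible by size is at least size long
theorem size_le_len (l : List Char) (size : Nat) (hs : 0 < size)
    (hd : l.length % size = 0) (hne : l ≠ []) : size ≤ l.length := by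
  by_contra hlt
  rw [Nat.mod_eq_of_lt (by omega)] at hd
  exact hne (List.length_eq_zero_iff.mp hd)

-- chunks flatten back to the list when size divides the length
theorem chopSeq_flatten (l : List Char) (size : Nat) (hs : 0 < size) :
    l.length % size = 0 → (chopSeq l size).flatten = l := by
  induction l using chopSeq.induct size with
  | case1 l h ih =>
    intro hd
    rw [chopSeq, dif_pos h]
    have hd' : (l.drop size).length % size = 0 := by
      simp only [List.length_drop]
      rw [← Nat.mod_eq_sub_mod h.2]
      exact hd
    simp [ih hd']
  | case2 l h =>
    intro hd
    rw [chopSeq, dif_neg h]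
    rw [Nat.mod_eq_of_lt (by omega)] at hd
    simpa using (List.length_eq_zero_iff.mp hd).symm

-- number of chunks
theorem chopSeq_length (l : List Char) (size : Nat) (hs : 0 < size) :
    l.length % size = 0 → (chopSeq l size).length = l.length / size := by
  induction l using chopSeq.induct size with
  | case1 l h ih =>
    intro hd
    rw [chopSeq, dif_pos h]
    have hd' : (l.drop size).length % size = 0 := by
      simp only [List.length_drop]
      rw [← Nat.mod_eq_sub_mod h.2]
      exact hd
    simp only [List.length_cons, ih hd', List.length_drop]
    rw [Nat.div_eq_sub_div hs h.2]
  | case2 l h =>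
    intro hd
    rw [chopSeq, dif_neg h]
    rw [Nat.mod_eq_of_lt (by omega)] at hd
    simp [List.length_eq_zero_iff.mp hd]

-- chopping a k-fold repetition of a unit of length = size yields k copies of the unit
theorem chopSeq_replicate (u : List Char) (size k : Nat) (hs : 0 < size)
    (hu : u.length = size) :
    chopSeq (List.replicate k u).flatten size = List.replicate k u := by
  subst hu
  induction k with
  | zero =>
    simp only [List.replicate_zero, List.flatten_nil]
    rw [chopSeq, dif_neg (by rintro ⟨h1, h2⟩; simp at h2; simp [h2] at h1)]
  | succ k ih =>
    rw [List.replicate_succ, List.flatten_cons]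
    rw [chopSeq, dif_pos ⟨hs, by simp⟩]
    rw [List.take_left, List.drop_left, ih, ← List.replicate_succ]

-- deduplicating a non-empty constant list gives the singleton
theorem ofList_replicate (u : List Char) (k : Nat) (hk : 0 < k) :
    PySem.Set.ofList (List.replicate k u) = [u] := by
  induction k with
  | zero => omega
  | succ k ih =>
    by_cases hk' : 0 < k
    · have : List.replicate (k + 1) u = List.replicate k u ++ [u] := by
        simp [List.replicate_succ']
      rw [this, PySem.Set.ofList_append, ih hk']
      simp [PySem.Set.update, PySem.Set.add, PySem.Set.contains]
    · have hz : k = 0 := by omega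
      subst hz
      simp [PySem.Set.ofList, PySem.Set.add, PySem.Set.contains]

-- a set of size 1 means: its one element occurs in the source list and every element equals it
theorem ofList_len_one {α : Type} [BEq α] [LawfulBEq α] (xs : List α)
    (h : (PySem.Set.ofList xs).length = 1) :
    ∃ a, PySem.Set.ofList xs = [a] ∧ a ∈ xs ∧ ∀ c ∈ xs, c = a := by
  obtain ⟨a, ha⟩ : ∃ a, PySem.Set.ofList xs = [a] := by
    cases hcase : PySem.Set.ofList xs with
    | nil => rw [hcase] at h; simp at h
    | cons b t =>
      rw [hcase] at h
      simp at h
      exact ⟨b, by rw [h]⟩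
  refine ⟨a, ha, ?_, ?_⟩
  · have : a ∈ PySem.Set.ofList xs := by rw [ha]; simp
    rwa [PySem.Set.mem_ofList] at this
  · intro c hc
    have : c ∈ PySem.Set.ofList xs := (PySem.Set.mem_ofList _ _).mpr hc
    rw [ha] at this
    simpa using this

-- all chunks equal ⇒ the chunk list is a replicate of the first chunk (= take size)
theorem chunks_const (l : List Char) (size : Nat) (hs : 0 < size)
    (hd : l.length % size = 0) (a : List Char)
    (hmem : a ∈ chopSeq l size) (hall : ∀ c ∈ chopSeq l size, c = a) :
    chopSeq l size = List.replicate (l.length / size) a ∧ a = l.take size ∧ l ≠ [] := by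
  have hne : chopSeq l size ≠ [] := by intro h; rw [h] at hmem; simp at hmem
  have hsz : size ≤ l.length := by
    by_contra hlt
    rw [chopSeq, dif_neg (by omega)] at hne
    exact hne rfl
  have hhead : a = l.take size := by
    have : l.take size ∈ chopSeq l size := by
      rw [chopSeq, dif_pos ⟨hs, hsz⟩]; simp
    exact (hall _ this).symm
  refine ⟨?_, hhead, ?_⟩
  · have h1 : chopSeq l size = List.replicate ((chopSeq l size).length) a :=
      List.eq_replicate_of_mem hall
    rwa [chopSeq_length l size hs hd] at h1
  · intro h
    subst h
    simp at hsz
    omega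

-- the per-size loop bodies agree
theorem step_eq (l : List Char) (size : Nat) (rest : List Nat) (hs : 0 < size)
    (hrec : findRepeatLoop l rest = findRepeatAltLoop l rest) :
    findRepeatLoop l (size :: rest) = findRepeatAltLoop l (size :: rest) := by
  rw [findRepeatLoop, findRepeatAltLoop]
  by_cases hd : l.length % size = 0
  · rw [if_pos hd]
    by_cases hB : l ≠ [] ∧ l.length % size = 0 ∧
        l = (List.replicate (l.length / size) (l.take size)).flatten
    · rw [if_pos hB]
      obtain ⟨hne, -, hrep⟩ := hB
      have hsz : size ≤ l.length := size_le_len l size hs hd hne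
      have hk : 0 < l.length / size := Nat.div_pos hsz hs
      have hu : (l.take size).length = size := by
        simp only [List.length_take]
        omega
      have hchop : chopSeq l size = List.replicate (l.length / size) (l.take size) := by
        conv_lhs => rw [hrep]
        exact chopSeq_replicate _ _ _ hs hu
      simp only [hchop, ofList_replicate _ _ hk]
      simp
    · rw [if_neg hB]
      by_cases h1 : (PySem.Set.ofList (chopSeq l size)).length = 1
      · exfalso
        obtain ⟨a, -, hmem, hall⟩ := ofList_len_one _ h1
        obtain ⟨hrep, hha, hne⟩ := chunks_const l size hs hd a hmem hall
        apply hB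
        refine ⟨hne, hd, ?_⟩
        conv_lhs => rw [← chopSeq_flatten l size hs hd]
        rw [hrep, hha]
      · rw [if_neg h1]; exact hrec
  · rw [if_neg hd, if_neg (by tauto)]
    exact hrec

-- ===== VERDICT (by name: the statement is the Claim_ definition above) =====
theorem find_repeat_spec : Claim_equal_find_repeat := by
  intro seq _
  unfold Spec_find_repeat find_repeat find_repeat_alt
  apply step_eq _ _ _ (by norm_num)
  apply step_eq _ _ _ (by norm_num)
  apply step_eq _ _ _ (by norm_num)
  rfl
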